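-- pv_equiv track=rewrite | github.com/EvansKCCR/Schistosoma-Integrin-modelling | 01_integrin_detection_classification/scripts/integrin_alpha_scan_and_classify.py | tail_after_tm
-- ===== SOURCE A (Python) =====
-- from typing import Dict, Tuple, List, Optional
--
-- HYDRO_TAIL = set("AILVFWYMGTC")
--
-- def tail_after_tm(seq: str) -> Tuple[int, str]:
--     best = -1
--     for i in range(len(seq) - 18):
--         window = seq[i:i+19]
--         if sum(1 for c in window if c in HYDRO_TAIL) >= 17:
--             best = i
--     if best != -1:
--         start = best + 19
--         return start + 0, seq[start:]
--     start = max(0, len(seq) - 200)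
--     return start + 1, seq[start:]
-- ===== SOURCE B (Python) =====
-- HYDRO_TAIL = set("AILVFWYMGTC")
--
-- def tail_after_tm(seq: str):
--     n = len(seq)
--     hit = None
--     if n >= 19:
--         # scan windows right-to-left with a sliding hydrophobic count;
--         # the first qualifying window found is the rightmost one (= A's last winner)
--         i = n - 19
--         cnt = sum(1 for c in seq[i:] if c in HYDRO_TAIL)
--         while True:
--             if cnt >= 17:
--                 hit = i
--                 break
--             if i == 0:
--                 break
--             i -= 1
--             cnt += (seq[i] in HYDRO_TAIL) - (seq[i + 19] in HYDRO_TAIL)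
--     if hit is not None:
--         return hit + 19, seq[hit + 19:]
--     start = max(0, n - 200)
--     return start + 1, seq[start:]
-- ===== Notes on version B (the rewrite author's own statement) =====
-- stated objective: faster
-- what changed: B scans the windows right-to-left with a sliding count updated in O(1) per step and stops at the first qualifying window (the rightmost, which is A's last winner), instead of A's left-to-right recount of all 19 characters of every window.
import Mathlib
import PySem

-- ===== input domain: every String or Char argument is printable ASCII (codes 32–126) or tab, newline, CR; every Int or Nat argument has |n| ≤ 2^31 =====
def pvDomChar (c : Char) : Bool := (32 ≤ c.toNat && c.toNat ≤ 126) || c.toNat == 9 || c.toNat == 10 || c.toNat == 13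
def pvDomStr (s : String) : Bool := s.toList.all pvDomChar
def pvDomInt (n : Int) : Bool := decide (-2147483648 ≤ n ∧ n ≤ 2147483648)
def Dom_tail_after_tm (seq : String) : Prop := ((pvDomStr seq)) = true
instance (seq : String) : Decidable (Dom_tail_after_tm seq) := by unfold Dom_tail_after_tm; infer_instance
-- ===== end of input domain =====

-- B scans the windows right-to-left with a sliding count, stopping at the first (= rightmost,
-- A's last-winner) qualifying window, instead of A's left-to-right recount of every window.

-- HYDRO_TAIL = set("AILVFWYMGTC")  (module constant shared by both programs)
def hydroTail : PySem.Set Char := PySem.Set.ofList "AILVFWYMGTC".toList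

-- ===== PORT A =====
def tail_after_tm (seq : String) : Int × String :=
  let l := seq.toList
  let n : Int := PySem.Str.len seq
  let best : Int :=
    (PySem.List.pyRange 0 (n - 18) 1).foldl
      (fun best i =>
        let window := PySem.List.slice l (some i) (some (i + 19))
        -- sum(1 for c in window if c in HYDRO_TAIL)
        if window.foldl (fun s c => if hydroTail.contains c then s + 1 else s) (0 : Int) ≥ 17
        then i else best)
      (-1)
  if best ≠ -1 then
    let start := best + 19
    (start + 0, String.ofList (PySem.List.slice l (some start) none))
  else
    let start := max 0 (n - 200)
    (start + 1, String.ofList (PySem.List.slice l (some start) none))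

-- ===== PORT B =====
-- the 'while True' loop of Source B: i counts down, cnt is the sliding window count;
-- returns the index of the first qualifying window met (Python's 'hit', None = none)
def tmScan (l : List Char) : Nat → Int → Option Nat
  | 0, cnt => if 17 ≤ cnt then some 0 else none
  | j + 1, cnt =>
      if 17 ≤ cnt then some (j + 1)
      else
        -- cnt += (seq[i] in HYDRO_TAIL) - (seq[i+19] in HYDRO_TAIL)  (after i -= 1)
        tmScan l j
          (cnt + (if hydroTail.contains (PySem.List.pyGetD l (j : Int) ' ') then 1 else 0)
               - (if hydroTail.contains (PySem.List.pyGetD l ((j : Int) + 19) ' ') then 1 else 0))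

def tail_after_tm_alt (seq : String) : Int × String :=
  let l := seq.toList
  let n : Int := PySem.Str.len seq
  let hit : Option Nat :=
    if 19 ≤ n then
      -- cnt = sum(1 for c in seq[n-19:] if c in HYDRO_TAIL)
      tmScan l (l.length - 19)
        ((PySem.List.slice l (some (n - 19)) none).foldl
          (fun s c => if hydroTail.contains c then s + 1 else s) (0 : Int))
    else none
  match hit with
  | some i => ((i : Int) + 19, String.ofList (l.drop (i + 19)))  -- seq[hit+19:], nonneg index
  | none => (((l.length - 200 : Nat) : Int) + 1, String.ofList (l.drop (l.length - 200)))

-- ===== PRECONDITION & SPEC =====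
def Spec_tail_after_tm (seq : String) (out : Int × String) : Prop := out = tail_after_tm_alt seq
instance (seq : String) (out : Int × String) : Decidable (Spec_tail_after_tm seq out) := by unfold Spec_tail_after_tm; infer_instance

-- ===== CLAIM (what is proved, stated in full; the proofs are below) =====
def Claim_equal_tail_after_tm : Prop := ∀ (seq : String), Dom_tail_after_tm seq → Spec_tail_after_tm seq (tail_after_tm seq)

-- ===== LEMMAS AND PROOFS =====

-- the index of the LAST window below m whose hydrophobic count is ≥ 17 (shared reference spec)
def lastHit (l : List Char) : Nat → Option Nat
  | 0 => none
  | m + 1 =>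
      if 17 ≤ (((l.drop m).take 19).countP (fun c => hydroTail.contains c) : Int)
      then some m else lastHit l m

-- the value both programs compute, phrased through lastHit
def tmTarget (l : List Char) : Int × String :=
  match lastHit l (l.length - 18) with
  | some i => ((i : Int) + 19, String.ofList (l.drop (i + 19)))
  | none => (((l.length - 200 : Nat) : Int) + 1, String.ofList (l.drop (l.length - 200)))

-- A's per-window test equals the reference window count
theorem condA_eq (l : List Char) (i : Nat) :
    ((PySem.List.slice l (some (i : Int)) (some ((i : Int) + 19))).foldl
        (fun s c => if hydroTail.contains c then s + 1 else s) (0 : Int) ≥ 17)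
      = (17 ≤ (((l.drop i).take 19).countP (fun c => hydroTail.contains c) : Int)) := by
  rw [show ((i : Int) + 19) = ((i + 19 : Nat) : Int) by push_cast; ring,
      PySem.List.slice_natCast, PySem.List.foldl_count_if,
      show i + 19 - i = 19 from by omega]
  simp only [zero_add, ge_iff_le]

-- A's fold over the index range returns the last qualifying index (or -1)
theorem foldA_eq_lastHit (l : List Char) (m : Nat) :
    (PySem.List.pyRange 0 (m : Int) 1).foldl
      (fun best i =>
        if (PySem.List.slice l (some i) (some (i + 19))).foldl
            (fun s c => if hydroTail.contains c then s + 1 else s) (0 : Int) ≥ 17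
        then i else best) (-1)
      = (match lastHit l m with | some i => (i : Int) | none => -1) := by
  induction m with
  | zero => simp [PySem.List.pyRange_one_eq_nil, lastHit]
  | succ m ih =>
    rw [show ((m + 1 : Nat) : Int) = ((m : Int) + 1) by push_cast; ring,
        PySem.List.pyRange_one_succ_right (by omega), List.foldl_append]
    simp only [List.foldl_cons, List.foldl_nil, ih, condA_eq l m, lastHit]
    split_ifs <;> simp

-- sliding-window step: the count at window j from the count at window j+1
theorem slide (l : List Char) (j : Nat) (h : j + 20 ≤ l.length) :
    (((l.drop j).take 19).countP (fun c => hydroTail.contains c) : Int)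
      = (((l.drop (j + 1)).take 19).countP (fun c => hydroTail.contains c) : Int)
        + (if hydroTail.contains (PySem.List.pyGetD l (j : Int) ' ') then 1 else 0)
        - (if hydroTail.contains (PySem.List.pyGetD l ((j : Int) + 19) ' ') then 1 else 0) := by
  have hj : j < l.length := by omega
  have hj19 : j + 19 < l.length := by omega
  have e1 : (l.drop j).take 19 = l[j] :: (l.drop (j + 1)).take 18 := by
    rw [List.drop_eq_getElem_cons hj]; rfl
  have e2 : (l.drop (j + 1)).take 19 = (l.drop (j + 1)).take 18 ++ [l[j + 19]] := by
    rw [List.take_add_one]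
    congr 1
    simp [List.getElem?_drop, show j + 1 + 18 = j + 19 by ring,
          List.getElem?_eq_getElem hj19]
  have g1 : PySem.List.pyGetD l (j : Int) ' ' = l[j] := by
    rw [PySem.List.pyGetD_natCast, List.getD_eq_getElem l ' ' hj]
  have g2 : PySem.List.pyGetD l ((j : Int) + 19) ' ' = l[j + 19] := by
    rw [show ((j : Int) + 19) = ((j + 19 : Nat) : Int) by push_cast; ring,
        PySem.List.pyGetD_natCast, List.getD_eq_getElem l ' ' hj19]
  rw [e1, e2, g1, g2, List.countP_cons, List.countP_append]
  simp only [List.countP_singleton]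
  split_ifs <;> push_cast <;> ring

-- B's downward scan, started with the correct window count, computes lastHit
theorem tmScan_eq_lastHit (l : List Char) (i : Nat) (h : i + 19 ≤ l.length) :
    tmScan l i (((l.drop i).take 19).countP (fun c => hydroTail.contains c) : Int)
      = lastHit l (i + 1) := by
  induction i with
  | zero => simp [tmScan, lastHit]
  | succ j ih =>
    rw [tmScan, lastHit]
    by_cases hc : 17 ≤ (((l.drop (j + 1)).take 19).countP (fun c => hydroTail.contains c) : Int)
    · rw [if_pos hc, if_pos hc]
    · rw [if_neg hc, if_neg hc, ← slide l j (by omega), ih (by omega)]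

-- A computes tmTarget
theorem A_eq_target (seq : String) : tail_after_tm seq = tmTarget seq.toList := by
  unfold tail_after_tm tmTarget
  rw [PySem.Str.len_eq]
  set l := seq.toList with hl
  set N := l.length with hN
  have hfold :
      (PySem.List.pyRange 0 ((N : Int) - 18) 1).foldl
        (fun best i =>
          if (PySem.List.slice l (some i) (some (i + 19))).foldl
              (fun s c => if hydroTail.contains c then s + 1 else s) (0 : Int) ≥ 17
          then i else best) (-1)
        = (match lastHit l (N - 18) with | some i => (i : Int) | none => -1) := by
    by_cases h18 : 18 ≤ N
    · rw [show (N : Int) - 18 = ((N - 18 : Nat) : Int) by omega, foldA_eq_lastHit]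
    · rw [PySem.List.pyRange_one_eq_nil (by omega), List.foldl_nil,
          show N - 18 = 0 from by omega]
      simp [lastHit]
  simp only [hfold]
  cases hlast : lastHit l (N - 18) with
  | some i =>
    dsimp only
    rw [if_pos (show (i : Int) ≠ -1 from by omega), show ((i : Int) + 19) = ((i + 19 : Nat) : Int) from by push_cast; ring,
        PySem.List.slice_from_natCast]
    simp
  | none =>
    dsimp only
    rw [if_neg (show ¬ (-1 : Int) ≠ -1 from by decide),
        show max 0 ((N : Int) - 200) = ((N - 200 : Nat) : Int) from by omega,
        PySem.List.slice_from_natCast]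

-- B computes tmTarget
theorem B_eq_target (seq : String) : tail_after_tm_alt seq = tmTarget seq.toList := by
  unfold tail_after_tm_alt tmTarget
  rw [PySem.Str.len_eq]
  set l := seq.toList with hl
  set N := l.length with hN
  simp only [← hN]
  by_cases h19 : 19 ≤ N
  · have hcnt :
        (PySem.List.slice l (some ((N : Int) - 19)) none).foldl
            (fun s c => if hydroTail.contains c then s + 1 else s) (0 : Int)
          = (((l.drop (N - 19)).take 19).countP (fun c => hydroTail.contains c) : Int) := by
      rw [show ((N : Int) - 19) = ((N - 19 : Nat) : Int) from by omega,
          PySem.List.slice_from_natCast, PySem.List.foldl_count_if,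
          List.take_of_length_le (by rw [List.length_drop, ← hN]; omega)]
      simp only [zero_add]
    rw [if_pos (show (19 : Int) ≤ (N : Int) from by omega), hcnt,
        tmScan_eq_lastHit l (N - 19) (by omega),
        show N - 19 + 1 = N - 18 from by omega]
  · rw [if_neg (show ¬ (19 : Int) ≤ (N : Int) from by omega),
        show N - 18 = 0 from by omega,
        show lastHit l 0 = none from rfl]

-- ===== VERDICT (by name: the statement is the Claim_ definition above) =====
theorem tail_after_tm_spec : Claim_equal_tail_after_tm := by
  intro seq _
  unfold Spec_tail_after_tm
  rw [A_eq_target, B_eq_target]
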